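-- pv_equiv track=rewrite | github.com/dimasickky/sql-db-extension | panels_editor.py | _split_statements
-- ===== SOURCE A (Python) =====
-- def _split_statements(sql: str) -> list[str]:
--     """Split SQL on ; outside of quotes. Returns non-empty trimmed statements."""
--     parts: list[str] = []
--     buf: list[str] = []
--     quote = None
--     i = 0
--     while i < len(sql):
--         c = sql[i]
--         if quote:
--             buf.append(c)
--             if c == quote and sql[i - 1] != "\\":
--                 quote = None
--         else:
--             if c in ("'", '"', "`"):
--                 quote = c
--                 buf.append(c)
--             elif c == ";":
--                 stmt = "".join(buf).strip()
--                 if stmt: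
--                     parts.append(stmt)
--                 buf = []
--             else:
--                 buf.append(c)
--         i += 1
--
--     tail = "".join(buf).strip()
--     if tail:
--         parts.append(tail)
--     return parts
-- ===== SOURCE B (Python) =====
-- def _split_statements(sql: str) -> list[str]:
--     """Split SQL on ; outside of quotes. Returns non-empty trimmed statements."""
--     # pass 1: indices of semicolons outside quotes
--     semis: list[int] = []
--     quote = None
--     for i, c in enumerate(sql):
--         if quote:
--             if c == quote and sql[i - 1] != "\\":
--                 quote = None
--         elif c in ("'", '"', "`"):
--             quote = c
--         elif c == ";":
--             semis.append(i)
--     # pass 2: slice between boundaries, strip, keep non-empty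
--     parts: list[str] = []
--     start = 0
--     for j in semis + [len(sql)]:
--         stmt = sql[start:j].strip()
--         if stmt:
--             parts.append(stmt)
--         start = j + 1
--     return parts
-- ===== Notes on version B (the rewrite author's own statement) =====
-- stated objective: faster
-- what changed: Replaces A's single-pass state machine that accumulates a per-character buffer with two passes: first collect the indices of semicolons outside quotes (same quote/escape detection, no buffer), then slice the string between consecutive boundaries, strip each slice and keep the non-empty ones.
import Mathlib
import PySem

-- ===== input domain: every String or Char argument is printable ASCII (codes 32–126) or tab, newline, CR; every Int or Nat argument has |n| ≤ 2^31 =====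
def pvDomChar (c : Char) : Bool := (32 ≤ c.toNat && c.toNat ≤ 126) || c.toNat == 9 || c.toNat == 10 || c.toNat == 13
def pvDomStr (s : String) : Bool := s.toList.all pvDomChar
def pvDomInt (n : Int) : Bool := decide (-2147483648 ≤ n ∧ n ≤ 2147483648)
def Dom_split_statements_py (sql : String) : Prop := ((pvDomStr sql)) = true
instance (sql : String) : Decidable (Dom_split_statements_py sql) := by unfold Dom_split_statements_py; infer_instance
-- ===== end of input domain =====

-- B replaces A's char-buffer state machine by two passes (collect outside-quote semicolon
-- indices, then slice/strip between boundaries); same result, an alternative decomposition.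

-- ===== PORT A =====
-- one-char state machine accumulating buf; sql[i-1] ported via pyGetD (always in range when read)
def aLoop (s : List Char) (i : Nat) (parts : List String) (buf : List Char) (quote : Option Char) : List String :=
  if h : i < s.length then
    let c := s[i]
    match quote with
    | some q =>
      if c = q ∧ PySem.List.pyGetD s ((i : Int) - 1) ' ' ≠ '\\' then
        aLoop s (i + 1) parts (buf ++ [c]) none
      else
        aLoop s (i + 1) parts (buf ++ [c]) (some q)
    | none =>
      if c = '\'' ∨ c = '"' ∨ c = '`' then
        aLoop s (i + 1) parts (buf ++ [c]) (some c)
      else if c = ';' then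
        let stmt := PySem.Chars.strip buf
        aLoop s (i + 1) (if stmt ≠ [] then parts ++ [String.ofList stmt] else parts) [] none
      else
        aLoop s (i + 1) parts (buf ++ [c]) none
  else
    let tail := PySem.Chars.strip buf
    if tail ≠ [] then parts ++ [String.ofList tail] else parts
termination_by s.length - i

def split_statements_py (sql : String) : List String :=
  aLoop sql.toList 0 [] [] none

-- ===== PORT B =====
-- pass 1: indices of semicolons outside quotes (no buffer)
def findSemis (s : List Char) (i : Nat) (quote : Option Char) : List Nat :=
  if h : i < s.length then
    let c := s[i]
    match quote with
    | some q =>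
      if c = q ∧ PySem.List.pyGetD s ((i : Int) - 1) ' ' ≠ '\\' then
        findSemis s (i + 1) none
      else
        findSemis s (i + 1) (some q)
    | none =>
      if c = '\'' ∨ c = '"' ∨ c = '`' then
        findSemis s (i + 1) (some c)
      else if c = ';' then
        i :: findSemis s (i + 1) none
      else
        findSemis s (i + 1) none
  else []
termination_by s.length - i

-- pass 2: sql[start:j].strip() for each boundary j, keep non-empty
def emitSegs (s : List Char) (start : Nat) (js : List Nat) (out : List String) : List String :=
  match js with
  | [] => out
  | j :: rest =>
      let stmt := PySem.Chars.strip ((s.drop start).take (j - start))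
      emitSegs s (j + 1) rest (if stmt ≠ [] then out ++ [String.ofList stmt] else out)

def split_statements_py_alt (sql : String) : List String :=
  let s := sql.toList
  emitSegs s 0 (findSemis s 0 none ++ [s.length]) []

-- ===== PRECONDITION & SPEC =====
def Spec_split_statements_py (sql : String) (out : List String) : Prop := out = split_statements_py_alt sql
instance (sql : String) (out : List String) : Decidable (Spec_split_statements_py sql out) := by unfold Spec_split_statements_py; infer_instance

-- ===== CLAIM (what is proved, stated in full; the proofs are below) =====
def Claim_equal_split_statements_py : Prop := ∀ (sql : String), Dom_split_statements_py sql → Spec_split_statements_py sql (split_statements_py sql)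

-- ===== LEMMAS AND PROOFS =====

-- bridge: A's state with a pending buffer, expressed over the remaining semicolon indices
def emitPre (s : List Char) (parts : List String) (buf : List Char) (start : Nat) (idxs : List Nat) : List String :=
  match idxs with
  | [] =>
      let stmt := PySem.Chars.strip (buf ++ s.drop start)
      if stmt ≠ [] then parts ++ [String.ofList stmt] else parts
  | j :: rest =>
      let stmt := PySem.Chars.strip (buf ++ (s.drop start).take (j - start))
      emitPre s (if stmt ≠ [] then parts ++ [String.ofList stmt] else parts) [] (j + 1) rest

lemma findSemis_ge (s : List Char) : ∀ n i q j, s.length - i ≤ n → j ∈ findSemis s i q → i ≤ j := by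
  intro n
  induction n with
  | zero =>
      intro i q j hn hj
      have h : ¬ i < s.length := by omega
      rw [findSemis] at hj
      simp only [dif_neg h] at hj
      exact absurd hj (List.not_mem_nil)
  | succ n ih =>
      intro i q j hn hj
      rw [findSemis] at hj
      by_cases h : i < s.length
      · simp only [dif_pos h] at hj
        have step : ∀ q', j ∈ findSemis s (i + 1) q' → i ≤ j := fun q' hm => by
          have := ih (i + 1) q' j (by omega) hm; omega
        cases q with
        | some q =>
            by_cases hc : s[i] = q ∧ PySem.List.pyGetD s ((i : Int) - 1) ' ' ≠ '\\'
            · exact step none (by simpa [if_pos hc] using hj)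
            · exact step (some q) (by simpa [if_neg hc] using hj)
        | none =>
            by_cases hq : s[i] = '\'' ∨ s[i] = '"' ∨ s[i] = '`'
            · exact step (some s[i]) (by simpa [if_pos hq] using hj)
            · by_cases hsemi : s[i] = ';'
              · simp only [if_neg hq, if_pos hsemi, List.mem_cons] at hj
                rcases hj with h1 | h1
                · omega
                · exact step none h1
              · exact step none (by simpa [if_neg hq, if_neg hsemi] using hj)
      · simp only [dif_neg h] at hj
        exact absurd hj (List.not_mem_nil)

lemma emitPre_shift (s : List Char) (i : Nat) (h : i < s.length) (parts : List String)
    (buf : List Char) (idxs : List Nat) (hidx : ∀ j ∈ idxs, i + 1 ≤ j) :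
    emitPre s parts (buf ++ [s[i]]) (i + 1) idxs = emitPre s parts buf i idxs := by
  have hdrop : s.drop i = s[i] :: s.drop (i + 1) := List.drop_eq_getElem_cons h
  cases idxs with
  | nil =>
      simp only [emitPre, hdrop]
      simp
  | cons j rest =>
      have hij : i + 1 ≤ j := hidx j (List.mem_cons_self)
      have hseg : (buf ++ [s[i]]) ++ (s.drop (i + 1)).take (j - (i + 1))
          = buf ++ (s.drop i).take (j - i) := by
        rw [hdrop]
        have : j - i = (j - (i + 1)) + 1 := by omega
        rw [this, List.take_succ_cons, List.append_assoc, List.singleton_append]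
      simp only [emitPre, hseg]

lemma aLoop_eq_emitPre (s : List Char) : ∀ n i parts buf quote, s.length - i = n →
    aLoop s i parts buf quote = emitPre s parts buf i (findSemis s i quote) := by
  intro n
  induction n with
  | zero =>
      intro i parts buf quote hn
      have h : ¬ i < s.length := by omega
      rw [aLoop, findSemis]
      simp only [dif_neg h]
      have : s.drop i = [] := List.drop_eq_nil_of_le (by omega)
      simp [emitPre, this]
  | succ n ih =>
      intro i parts buf quote hn
      have h : i < s.length := by omega
      rw [aLoop, findSemis]
      simp only [dif_pos h]
      have ihs : ∀ parts buf q', aLoop s (i+1) parts buf q'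
          = emitPre s parts buf (i+1) (findSemis s (i+1) q') := by
        intro parts buf q'; exact ih (i+1) parts buf q' (by omega)
      have hshift : ∀ q', emitPre s parts (buf ++ [s[i]]) (i + 1) (findSemis s (i+1) q')
          = emitPre s parts buf i (findSemis s (i+1) q') := by
        intro q'
        exact emitPre_shift s i h parts buf _ (fun j hj => findSemis_ge s (s.length - (i+1)) (i+1) q' j le_rfl hj)
      cases quote with
      | some q =>
          by_cases hc : s[i] = q ∧ PySem.List.pyGetD s ((i : Int) - 1) ' ' ≠ '\\'
          · simp only [if_pos hc]; rw [ihs, hshift]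
          · simp only [if_neg hc]; rw [ihs, hshift]
      | none =>
          by_cases hq : s[i] = '\'' ∨ s[i] = '"' ∨ s[i] = '`'
          · simp only [if_pos hq]; rw [ihs, hshift]
          · by_cases hsemi : s[i] = ';'
            · simp only [if_neg hq, if_pos hsemi]
              rw [ihs]
              have ht : ((s.drop i).take (i - i)) = [] := by simp
              simp only [emitPre, ht, List.append_nil]
            · simp only [if_neg hq, if_neg hsemi]; rw [ihs, hshift]

lemma emitSegs_eq_emitPre (s : List Char) : ∀ idxs start parts,
    emitSegs s start (idxs ++ [s.length]) parts = emitPre s parts [] start idxs := by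
  intro idxs
  induction idxs with
  | nil =>
      intro start parts
      have : (s.drop start).take (s.length - start) = s.drop start := by
        apply List.take_of_length_le; simp
      simp [emitSegs, emitPre, this]
  | cons j rest ih =>
      intro start parts
      simp only [List.cons_append, emitSegs, emitPre, List.nil_append]
      exact ih (j + 1) _

-- ===== VERDICT (by name: the statement is the Claim_ definition above) =====
theorem split_statements_py_spec : Claim_equal_split_statements_py := by
  intro sql _
  unfold Spec_split_statements_py split_statements_py split_statements_py_alt
  rw [emitSegs_eq_emitPre, aLoop_eq_emitPre sql.toList (sql.toList.length - 0) 0 [] [] none rfl]
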